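-- pv_equiv track=rewrite | github.com/yeachan153/Methodology-Consulting | Project/cos2.py | freqs_to_vector
-- ===== SOURCE A (Python) =====
-- def freqs_to_vector(freqs, vocabulary):
--     vocabulary2 = vocabulary.copy()
--     keys_list = [each_key for each_key in freqs if each_key in vocabulary2]
--     for index, word in enumerate(vocabulary2):
--         for each_key in keys_list:
--             if word == each_key:
--                 vocabulary2[index] = freqs[each_key]
--     for idx, each in enumerate(vocabulary2):
--         if type(each) == str:
--             vocabulary2[idx] = 0
--     return vocabulary2
-- ===== SOURCE B (Python) =====
-- def freqs_to_vector(freqs, vocabulary):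
--     out = list(vocabulary)
--     positions = {}
--     for i, w in enumerate(vocabulary):
--         positions[w] = positions.get(w, []) + [i]
--     for key, val in freqs.items():
--         for p in positions.get(key, []):
--             out[p] = val
--     return [0 if type(x) == str else x for x in out]
-- ===== Notes on version B (the rewrite author's own statement) =====
-- stated objective: faster
-- what changed: Replaces A's membership filter over the vocabulary and per-word scan of the key list by a single word-to-positions index built once over the vocabulary, then one scatter pass over freqs writing each count into all recorded positions.
import Mathlib
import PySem

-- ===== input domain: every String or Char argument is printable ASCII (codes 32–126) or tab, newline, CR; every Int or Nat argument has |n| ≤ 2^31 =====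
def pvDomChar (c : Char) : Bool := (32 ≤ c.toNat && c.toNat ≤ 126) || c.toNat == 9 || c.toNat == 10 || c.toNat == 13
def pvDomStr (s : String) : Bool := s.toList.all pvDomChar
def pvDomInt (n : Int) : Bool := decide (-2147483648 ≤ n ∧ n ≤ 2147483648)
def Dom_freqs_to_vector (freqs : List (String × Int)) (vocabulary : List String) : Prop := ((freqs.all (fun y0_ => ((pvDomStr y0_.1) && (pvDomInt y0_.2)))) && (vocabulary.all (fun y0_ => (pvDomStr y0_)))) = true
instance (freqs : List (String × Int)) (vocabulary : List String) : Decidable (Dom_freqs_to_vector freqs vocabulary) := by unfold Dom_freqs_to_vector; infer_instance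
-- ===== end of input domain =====

-- B replaces A's per-word scan of the key list by a scatter pass driven by a word→positions
-- index built once over the vocabulary (alternative decomposition; return value only).

-- ===== PORT A =====
-- inner loop 'for each_key in keys_list: if word == each_key: vocabulary2[index] = freqs[each_key]'
def pvAInner (d : PySem.Dict String Int) (keys : List String) (i : Nat)
    (word : String ⊕ Int) (st : List (String ⊕ Int)) : List (String ⊕ Int) :=
  keys.foldl (fun s k =>
    if word = Sum.inl k then PySem.List.pySetD s (i : Int) (Sum.inr (d.getD k 0)) else s) st

-- length is preserved by the inner loop (needed for termination of the outer loop)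
theorem pvAInner_length (d : PySem.Dict String Int) (keys : List String) (i : Nat)
    (word : String ⊕ Int) (st : List (String ⊕ Int)) :
    (pvAInner d keys i word st).length = st.length := by
  unfold pvAInner
  induction keys generalizing st with
  | nil => rfl
  | cons k ks ih =>
      simp only [List.foldl_cons]
      rw [ih]
      split <;> simp

-- outer loop 'for index, word in enumerate(vocabulary2)': word is read from the current list
def pvALoop (d : PySem.Dict String Int) (keys : List String)
    (st : List (String ⊕ Int)) (i : Nat) : List (String ⊕ Int) :=
  if h : i < st.length then
    pvALoop d keys (pvAInner d keys i st[i] st) (i + 1)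
  else st
termination_by st.length - i
decreasing_by rw [pvAInner_length]; omega

def freqs_to_vector (freqs : List (String × Int)) (vocabulary : List String) : List Int :=
  let d := PySem.Dict.ofList freqs
  let vocabulary2 : List (String ⊕ Int) := vocabulary.map Sum.inl
  let keys_list := d.keys.filter (fun k => vocabulary2.any (fun x => decide (x = Sum.inl k)))
  (pvALoop d keys_list vocabulary2 0).map (fun x => match x with
    | Sum.inl _ => 0
    | Sum.inr v => v)

-- ===== PORT B =====
def freqs_to_vector_alt (freqs : List (String × Int)) (vocabulary : List String) : List Int :=
  let out : List (String ⊕ Int) := vocabulary.map Sum.inl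
  -- positions[w] = positions.get(w, []) + [i]
  let positions : PySem.Dict String (List Int) :=
    (PySem.List.enumerate vocabulary).foldl
      (fun dd p => dd.modify p.2 [] (· ++ [p.1])) PySem.Dict.empty
  -- for key, val in freqs.items(): for p in positions.get(key, []): out[p] = val
  let out2 := (PySem.Dict.ofList freqs).items.foldl
    (fun o kv => (positions.getD kv.1 []).foldl
      (fun o2 p => PySem.List.pySetD o2 p (Sum.inr kv.2)) o) out
  out2.map (fun x => match x with
    | Sum.inl _ => 0
    | Sum.inr v => v)

-- ===== PRECONDITION & SPEC =====
def Spec_freqs_to_vector (freqs : List (String × Int)) (vocabulary : List String) (out : List Int) : Prop := out = freqs_to_vector_alt freqs vocabulary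
instance (freqs : List (String × Int)) (vocabulary : List String) (out : List Int) : Decidable (Spec_freqs_to_vector freqs vocabulary out) := by unfold Spec_freqs_to_vector; infer_instance

-- ===== CLAIM (what is proved, stated in full; the proofs are below) =====
def Claim_equal_freqs_to_vector : Prop := ∀ (freqs : List (String × Int)) (vocabulary : List String), Dom_freqs_to_vector freqs vocabulary → Spec_freqs_to_vector freqs vocabulary (freqs_to_vector freqs vocabulary)

-- ===== LEMMAS AND PROOFS =====

-- the per-element effect of A's nested loops
def pvT (d : PySem.Dict String Int) (keys : List String) : (String ⊕ Int) → (String ⊕ Int)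
  | Sum.inl w => if w ∈ keys then Sum.inr (d.getD w 0) else Sum.inl w
  | Sum.inr v => Sum.inr v

theorem pvAInner_inr (d : PySem.Dict String Int) (keys : List String) (i : Nat)
    (v : Int) (st : List (String ⊕ Int)) :
    pvAInner d keys i (Sum.inr v) st = st := by
  unfold pvAInner
  induction keys generalizing st with
  | nil => rfl
  | cons k ks ih =>
      simp only [List.foldl_cons]
      rw [if_neg (by simp)]
      exact ih st

theorem pvAInner_inl (d : PySem.Dict String Int) (keys : List String) (i : Nat)
    (w : String) (st : List (String ⊕ Int)) :
    pvAInner d keys i (Sum.inl w) st =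
      if w ∈ keys then st.set i (Sum.inr (d.getD w 0)) else st := by
  unfold pvAInner
  induction keys generalizing st with
  | nil => simp
  | cons k ks ih =>
      simp only [List.foldl_cons]
      rw [ih]
      by_cases hwk : w = k
      · subst hwk
        rw [if_pos rfl]
        by_cases hmem : w ∈ ks <;>
          simp [hmem, PySem.List.pySetD_natCast, List.set_set]
      · have hne : ¬(Sum.inl w = (Sum.inl k : String ⊕ Int)) := by simp [hwk]
        rw [if_neg hne]
        by_cases hmem : w ∈ ks <;> simp [hmem, hwk]

theorem pvALoop_getElem? (d : PySem.Dict String Int) (keys : List String) :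
    ∀ (n : Nat) (st : List (String ⊕ Int)) (i : Nat), st.length - i = n →
      ∀ j : Nat, (pvALoop d keys st i)[j]? =
        if j < i then st[j]? else (st[j]?).map (pvT d keys) := by
  intro n
  induction n with
  | zero =>
      intro st i h j
      rw [pvALoop, dif_neg (by omega)]
      by_cases hj : j < i
      · simp [hj]
      · have : st.length ≤ j := by omega
        simp [hj, List.getElem?_eq_none this]
  | succ n ih =>
      intro st i h j
      have hi : i < st.length := by omega
      rw [pvALoop, dif_pos hi]
      cases hw : st[i] with
      | inl w =>
          rw [pvAInner_inl]
          by_cases hmem : w ∈ keys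
          · rw [if_pos hmem]
            rw [ih _ (i + 1) (by simp; omega) j]
            rcases lt_trichotomy j i with hji | hji | hji
            · rw [if_pos (by omega), if_pos hji, List.getElem?_set]
              simp [Nat.ne_of_gt hji]
            · subst hji
              rw [if_pos (by omega), if_neg (by omega), List.getElem?_set]
              simp [hi, hw, pvT, hmem]
            · rw [if_neg (by omega), if_neg (by omega), List.getElem?_set]
              simp [Nat.ne_of_lt hji]
          · rw [if_neg hmem, ih _ (i + 1) (by omega) j]
            rcases lt_trichotomy j i with hji | hji | hji
            · rw [if_pos (by omega), if_pos hji]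
            · subst hji
              rw [if_pos (by omega), if_neg (by omega)]
              simp [List.getElem?_eq_getElem hi, hw, pvT, hmem]
            · rw [if_neg (by omega), if_neg (by omega)]
      | inr v =>
          rw [pvAInner_inr, ih _ (i + 1) (by omega) j]
          rcases lt_trichotomy j i with hji | hji | hji
          · rw [if_pos (by omega), if_pos hji]
          · subst hji
            rw [if_pos (by omega), if_neg (by omega)]
            simp [List.getElem?_eq_getElem hi, hw, pvT]
          · rw [if_neg (by omega), if_neg (by omega)]

-- positions.get(k, []) is the list of indices of k in the vocabulary
theorem pvPositions_getD (vocabulary : List String) (k : String) :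
    ((PySem.List.enumerate vocabulary).foldl
        (fun dd p => dd.modify p.2 [] (· ++ [p.1])) PySem.Dict.empty).getD k [] =
      (((PySem.List.enumerate vocabulary).filter (fun p => p.2 == k)).map (·.1)) := by
  have hfold : (PySem.List.enumerate vocabulary).foldl
        (fun dd p => dd.modify p.2 [] (· ++ [p.1])) PySem.Dict.empty =
      ((PySem.List.enumerate vocabulary).map Prod.swap).foldl
        (fun dd p => dd.modify p.1 [] (· ++ [p.2])) PySem.Dict.empty := by
    rw [List.foldl_map]; rfl
  rw [hfold, PySem.Dict.getD_foldl_modify_append]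
  simp [List.filter_map, List.map_map, Function.comp_def]

theorem pvEnumFilter_mem (k : String) :
    ∀ (xs : List String) (s q : Int),
      q ∈ (((PySem.List.enumerate xs s).filter (fun p => p.2 == k)).map (·.1)) ↔
        ∃ m : Nat, q = s + (m : Int) ∧ xs[m]? = some k := by
  intro xs
  induction xs with
  | nil => simp [PySem.List.enumerate]
  | cons x xs ih =>
      intro s q
      rw [PySem.List.enumerate_cons]
      simp only [List.filter_cons]
      by_cases hx : x = k
      · subst hx
        simp only [beq_self_eq_true, if_true, List.map_cons, List.mem_cons, ih (s + 1) q]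
        constructor
        · rintro (rfl | ⟨m, rfl, hm⟩)
          · exact ⟨0, by simp⟩
          · refine ⟨m + 1, ?_, by simpa using hm⟩
            push_cast; ring
        · rintro ⟨m, rfl, hm⟩
          cases m with
          | zero => left; simp
          | succ m =>
              right
              refine ⟨m, ?_, by simpa using hm⟩
              push_cast; ring
      · have hbeq : (x == k) = false := by simp [hx]
        rw [hbeq]
        simp only [Bool.false_eq_true, if_false, ih (s + 1) q]
        constructor
        · rintro ⟨m, rfl, hm⟩
          refine ⟨m + 1, ?_, by simpa using hm⟩
          push_cast; ring
        · rintro ⟨m, rfl, hm⟩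
          cases m with
          | zero => simp at hm; exact absurd hm hx
          | succ m =>
              refine ⟨m, ?_, by simpa using hm⟩
              push_cast; ring

theorem pvPos_mem (vocabulary : List String) (k : String) (j : Nat) :
    ((j : Int) ∈ (((PySem.List.enumerate vocabulary).filter (fun p => p.2 == k)).map (·.1))) ↔
      vocabulary[j]? = some k := by
  rw [pvEnumFilter_mem k vocabulary 0 (j : Int)]
  constructor
  · rintro ⟨m, hm, h⟩
    have : m = j := by omega
    rwa [this] at h
  · intro h
    exact ⟨j, by simp, h⟩

theorem pvPos_nonneg (vocabulary : List String) (k : String) (p : Int)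
    (hp : p ∈ (((PySem.List.enumerate vocabulary).filter (fun p => p.2 == k)).map (·.1))) :
    0 ≤ p := by
  rcases (pvEnumFilter_mem k vocabulary 0 p).mp hp with ⟨m, rfl, -⟩
  positivity

-- the inner scatter 'for p in ps: out[p] = v', elementwise
theorem pvScatterOne (v : String ⊕ Int) :
    ∀ (ps : List Int) (o : List (String ⊕ Int)), (∀ p ∈ ps, 0 ≤ p) → ∀ j : Nat,
      (ps.foldl (fun o2 p => PySem.List.pySetD o2 p v) o)[j]? =
        if (j : Int) ∈ ps then (if j < o.length then some v else none) else o[j]? := by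
  intro ps
  induction ps with
  | nil => intro o _ j; simp
  | cons p ps ih =>
      intro o hnn j
      have hp0 : 0 ≤ p := hnn p (by simp)
      simp only [List.foldl_cons]
      rw [PySem.List.pySetD_of_nonneg _ _ hp0,
        ih _ (fun q hq => hnn q (by simp [hq])) j]
      have hlen : (o.set p.toNat v).length = o.length := by simp
      by_cases hmem : (j : Int) ∈ ps
      · simp [hmem, List.mem_cons, hlen]
      · by_cases hjp : (j : Int) = p
        · have : p.toNat = j := by omega
          subst this
          simp [hjp, List.getElem?_set]
        · have : ¬ p.toNat = j := by omega
          simp [hjp, hmem, this]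

theorem pvScatterOne_length (v : String ⊕ Int) :
    ∀ (ps : List Int) (o : List (String ⊕ Int)),
      (ps.foldl (fun o2 p => PySem.List.pySetD o2 p v) o).length = o.length := by
  intro ps
  induction ps with
  | nil => intro o; rfl
  | cons p ps ih =>
      intro o
      simp only [List.foldl_cons]
      rw [ih]
      simp [PySem.List.length_pySetD]

-- the outer scatter over the (distinct-keyed) items, elementwise
theorem pvScatter (vocabulary : List String) :
    ∀ (its : List (String × Int)), (its.map (·.1)).Nodup →
      ∀ (o : List (String ⊕ Int)), o.length = vocabulary.length → ∀ j : Nat,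
        (its.foldl (fun o kv =>
            (((PySem.List.enumerate vocabulary).filter (fun p => p.2 == kv.1)).map (·.1)).foldl
              (fun o2 p => PySem.List.pySetD o2 p (Sum.inr kv.2)) o) o)[j]? =
          match its.find? (fun kv => vocabulary[j]? == some kv.1) with
          | some kv => some (Sum.inr kv.2)
          | none => o[j]? := by
  intro its
  induction its with
  | nil => intro _ o _ j; simp
  | cons kv rest ih =>
      intro hnd o hlen j
      have hnd' : (rest.map (·.1)).Nodup := (List.nodup_cons.mp hnd).2
      have hhead : kv.1 ∉ rest.map (·.1) := (List.nodup_cons.mp hnd).1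
      simp only [List.foldl_cons]
      set o' := (((PySem.List.enumerate vocabulary).filter (fun p => p.2 == kv.1)).map (·.1)).foldl
        (fun o2 p => PySem.List.pySetD o2 p (Sum.inr kv.2)) o with ho'
      have ho'len : o'.length = vocabulary.length := by
        rw [ho', pvScatterOne_length]; exact hlen
      have ho'j : o'[j]? = if vocabulary[j]? = some kv.1 then some (Sum.inr kv.2) else o[j]? := by
        rw [ho', pvScatterOne _ _ _ (fun p hp => pvPos_nonneg vocabulary kv.1 p hp) j]
        simp only [pvPos_mem]
        by_cases hvj : vocabulary[j]? = some kv.1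
        · have : j < vocabulary.length := by
            by_contra hcon
            rw [List.getElem?_eq_none (by omega)] at hvj
            simp at hvj
          simp [hlen, this]
        · simp [hvj]
      rw [ih hnd' o' ho'len j]
      by_cases hvj : vocabulary[j]? = some kv.1
      · have hrest : rest.find? (fun kv => vocabulary[j]? == some kv.1) = none := by
          rw [List.find?_eq_none]
          intro x hx hbeq
          apply hhead
          have : vocabulary[j]? = some x.1 := by simpa using hbeq
          rw [hvj] at this
          have hx1 : x.1 = kv.1 := by simpa using this.symm
          rw [← hx1]
          exact List.mem_map_of_mem hx
        rw [hrest, List.find?_cons_of_pos (by simp [hvj])]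
        simp [ho'j, hvj]
      · rw [List.find?_cons_of_neg (by simp [hvj])]
        cases hfind : rest.find? (fun kv => vocabulary[j]? == some kv.1) with
        | some kv' => rfl
        | none => simp [ho'j, hvj]

theorem pvFind_keys (w : String) :
    ∀ (l : List String), l.find? (fun k => w == k) = if w ∈ l then some w else none := by
  intro l
  induction l with
  | nil => simp
  | cons k ks ih =>
      by_cases hwk : w = k
      · subst hwk; simp
      · rw [List.find?_cons_of_neg (by simp [hwk]), ih]
        simp [List.mem_cons, hwk]

-- ===== VERDICT (by name: the statement is the Claim_ definition above) =====
theorem freqs_to_vector_spec : Claim_equal_freqs_to_vector := by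
  unfold Claim_equal_freqs_to_vector Spec_freqs_to_vector
  intro freqs vocabulary _
  unfold freqs_to_vector freqs_to_vector_alt
  set d := PySem.Dict.ofList freqs with hd
  apply List.ext_getElem?
  intro j
  rw [List.getElem?_map, List.getElem?_map]
  rw [pvALoop_getElem? d _ ((vocabulary.map Sum.inl).length - 0) (vocabulary.map Sum.inl) 0 rfl j]
  rw [if_neg (by omega)]
  have hitems : d.items = d.keys.map (fun k => (k, d.getD k 0)) :=
    PySem.Dict.items_eq_map_keys d (PySem.Dict.nodup_keys_ofList freqs) 0
  have hndk : (d.items.map (·.1)).Nodup := by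
    have : d.items.map (·.1) = d.keys := rfl
    rw [this]; exact PySem.Dict.nodup_keys_ofList freqs
  have hsc := pvScatter vocabulary d.items hndk (vocabulary.map Sum.inl) (by simp) j
  -- rewrite positions.getD inside the scatter fold
  have hposc : (fun (o : List (String ⊕ Int)) (kv : String × Int) =>
      ((((PySem.List.enumerate vocabulary).foldl
          (fun dd p => dd.modify p.2 [] (· ++ [p.1])) PySem.Dict.empty).getD kv.1 []).foldl
        (fun o2 p => PySem.List.pySetD o2 p (Sum.inr kv.2)) o)) =
      (fun (o : List (String ⊕ Int)) (kv : String × Int) =>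
      ((((PySem.List.enumerate vocabulary).filter (fun p => p.2 == kv.1)).map (·.1)).foldl
        (fun o2 p => PySem.List.pySetD o2 p (Sum.inr kv.2)) o)) := by
    funext o kv
    rw [pvPositions_getD]
  rw [hposc, hsc]
  cases hvj : vocabulary[j]? with
  | none =>
      have hfn : d.items.find? (fun _ : String × Int => false) = none :=
        List.find?_eq_none.mpr (fun x _ => by simp)
      simp [hvj, hfn]
  | some w =>
      have hwvoc : w ∈ vocabulary := List.mem_of_getElem? hvj
      have hmapj : (vocabulary.map Sum.inl)[j]? = some (Sum.inl w : String ⊕ Int) := by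
        rw [List.getElem?_map, hvj]; rfl
      rw [hmapj]
      -- find? over items
      have hfind : d.items.find? (fun kv => (some w : Option String) == some kv.1) =
          if w ∈ d.keys then some (w, d.getD w 0) else none := by
        rw [hitems, List.find?_map]
        have hcomp : ((fun kv : String × Int => (some w : Option String) == some kv.1) ∘
            (fun k => (k, d.getD k 0))) = (fun k => w == k) := by
          funext k; simp
        rw [hcomp, pvFind_keys]
        by_cases hwk : w ∈ d.keys <;> simp [hwk]
      rw [hfind]
      -- A side: membership in keys_list
      by_cases hwk : w ∈ d.keys
      · rw [if_pos hwk]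
        simp [pvT, List.mem_filter, hwk, hwvoc]
      · rw [if_neg hwk]
        simp [pvT, List.mem_filter, hwk]
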